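-- pv_equiv track=rewrite | github.com/kusakabeka/ege | 23/grath_rec/4.py | f
-- ===== SOURCE A (Python) =====
-- def f(x, y):
--     if x > y:
--         return 0
--     if x == y:
--         return 1
--     if x == 8: # тк нельзя идти через восьмерку
--         # то у нас 0 решений
--         return 0
--     return f(x + 1, y) + f(x + 2, y) + f(x + 3, y)
-- ===== SOURCE B (Python) =====
-- def f(x, y):
--     # Bottom-up DP: walk v from y-1 down to x keeping (g(v), g(v+1), g(v+2)),
--     # where g(v) = number of paths from v to y.
--     if x > y:
--         return 0
--     a, b, c = 1, 0, 0  # g(y), g(y+1), g(y+2)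
--     for v in range(y - 1, x - 1, -1):
--         cur = 0 if v == 8 else a + b + c
--         a, b, c = cur, a, b
--     return a
-- ===== Notes on version B (the rewrite author's own statement) =====
-- stated objective: alternative
-- what changed: Replaces the triple-branching exponential recursion by a single bottom-up pass from y down to x that keeps only the last three path counts; Pre_ excludes only gaps over 900, near CPython's recursion limit of 1000, where A raises RecursionError.
import Mathlib
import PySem

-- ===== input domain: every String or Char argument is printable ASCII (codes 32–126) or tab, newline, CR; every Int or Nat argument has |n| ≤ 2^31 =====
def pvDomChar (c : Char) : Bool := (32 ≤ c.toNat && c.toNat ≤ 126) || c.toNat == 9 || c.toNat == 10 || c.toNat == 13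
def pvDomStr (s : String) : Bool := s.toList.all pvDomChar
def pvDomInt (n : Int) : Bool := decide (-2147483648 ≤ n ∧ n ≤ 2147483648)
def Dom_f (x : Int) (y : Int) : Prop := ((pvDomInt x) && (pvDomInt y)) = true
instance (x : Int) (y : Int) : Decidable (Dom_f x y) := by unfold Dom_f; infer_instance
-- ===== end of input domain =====

-- B replaces A's triple-branching recursion by a single bottom-up pass keeping the last three path counts; proved equal wherever A returns (Pre_ excludes the RecursionError region).
-- ===== PORT A =====
def f (x : Int) (y : Int) : Int :=
  if x > y then 0
  else if x = y then 1
  else if x = 8 then 0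
  else f (x + 1) y + f (x + 2) y + f (x + 3) y
termination_by (y - x).toNat
decreasing_by all_goals omega

-- ===== PORT B =====
def fAltStep (st : Int × Int × Int) (v : Int) : Int × Int × Int :=
  ((if v = 8 then 0 else st.1 + st.2.1 + st.2.2), st.1, st.2.1)

def f_alt (x : Int) (y : Int) : Int :=
  if x > y then 0
  else ((PySem.List.pyRange (y - 1) (x - 1) (-1)).foldl fAltStep (1, 0, 0)).1

-- ===== PRECONDITION & SPEC =====
-- Pre_ excludes gaps y - x > 900: A's recursion depth is about y - x, so near CPython's
-- default recursion limit of 1000 (lowered further by the harness's own stack depth)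
-- Python A raises RecursionError; the margin keeps every raising input outside Pre_.
def Pre_f (x : Int) (y : Int) : Prop := y - x ≤ 900
instance (x : Int) (y : Int) : Decidable (Pre_f x y) := by unfold Pre_f; infer_instance
def pvWitness_f : Int × Int := (0, 10)

def Spec_f (x : Int) (y : Int) (out : Int) : Prop := out = f_alt x y
instance (x : Int) (y : Int) (out : Int) : Decidable (Spec_f x y out) := by unfold Spec_f; infer_instance

-- ===== CLAIM (what is proved, stated in full; the proofs are below) =====
def Claim_equal_f : Prop := ∀ (x : Int) (y : Int), Dom_f x y → Pre_f x y → Spec_f x y (f x y)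

-- ===== LEMMAS AND PROOFS =====
-- The DP invariant: after consuming the countdown from y-1 to x the state holds (g x, g(x+1), g(x+2)).
theorem fold_invariant (x y : Int) (h : x ≤ y) :
    (PySem.List.pyRange (y - 1) (x - 1) (-1)).foldl fAltStep (1, 0, 0)
      = (f x y, f (x + 1) y, f (x + 2) y) := by
  induction hd : (y - x).toNat generalizing x with
  | zero =>
    have hxy : x = y := by omega
    subst hxy
    rw [PySem.List.pyRange_neg_one_eq_nil (by omega)]
    simp [f]
  | succ n ih =>
    have hx : x < y := by omega
    rw [PySem.List.pyRange_neg_one_eq_reverse]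
    have e1 : x - 1 + 1 = x := by ring
    have e2 : y - 1 + 1 = y := by ring
    rw [e1, e2, PySem.List.pyRange_one_cons (by omega : x < y)]
    have : (x :: PySem.List.pyRange (x + 1) y 1).reverse
        = (PySem.List.pyRange (x + 1) y 1).reverse ++ [x] := by simp
    rw [this, List.foldl_append]
    have ih' := ih (x + 1) (by omega) (by omega)
    have e3 : x + 1 - 1 = x := by ring
    rw [e3, PySem.List.pyRange_neg_one_eq_reverse, e2] at ih'
    rw [ih']
    simp only [List.foldl, fAltStep]
    have hfx : f x y = if x = 8 then 0 else f (x + 1) y + f (x + 2) y + f (x + 3) y := by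
      rw [f]
      simp only [if_neg (by omega : ¬ x > y), if_neg (by omega : ¬ x = y)]
    have a1 : x + 1 + 1 = x + 2 := by ring
    have a2 : x + 1 + 2 = x + 3 := by ring
    rw [hfx, a1, a2]

-- ===== VERDICT (by name: the statement is the Claim_ definition above) =====
theorem f_spec : Claim_equal_f := by
  intro x y _ _
  unfold Spec_f f_alt
  by_cases hxy : x > y
  · rw [if_pos hxy, f, if_pos hxy]
  · rw [if_neg hxy, fold_invariant x y (by omega)]
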